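-- pv_equiv track=rewrite | github.com/neoboid/git-p4son | git_p4son/lib.py | split_description_lines
-- ===== SOURCE A (Python) =====
-- def split_description_lines(lines: list[str]) -> tuple[list[str], list[str], list[str]]:
--     """
--     Split changelist description lines into the user message, the
--     enumerated commit list, and any trailing text.
--
--     The commit list starts at the first line matching "1. " and
--     continues as long as lines match "<number>. ". Any text after
--     the numbered list is returned as trailing lines.
--
--     Args:
--         lines: The description as a list of lines
--
--     Returns:
--         Tuple of (message_lines, commit_lines, trailing_lines).
--         Each may be an empty list.
--     """
--     # Find start of numbered list
--     start = None
--     for i, line in enumerate(lines):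
--         if line.startswith('1. '):
--             start = i
--             break
--     if start is None:
--         return (lines, [], [])
--
--     # Find end of numbered list (consecutive "<number>. " lines)
--     end = start + 1
--     expected_nr = 2
--     for j in range(end, len(lines)):
--         if lines[j].startswith(f'{expected_nr}. '):
--             expected_nr += 1
--             end = j + 1
--         else:
--             break
--
--     return (lines[:start], lines[start:end], lines[end:])
-- ===== SOURCE B (Python) =====
-- def split_description_lines(lines: list[str]) -> tuple[list[str], list[str], list[str]]:
--     """Single pass: three-state machine (before-list / in-list / after-list)."""
--     message, commit, trailing = [], [], []
--     state = 0  # 0 = before list, 1 = inside list, 2 = after list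
--     expected = 2
--     for line in lines:
--         if state == 0:
--             if line.startswith('1. '):
--                 commit.append(line)
--                 state = 1
--             else:
--                 message.append(line)
--         elif state == 1:
--             if line.startswith(f'{expected}. '):
--                 commit.append(line)
--                 expected += 1
--             else:
--                 trailing.append(line)
--                 state = 2
--         else:
--             trailing.append(line)
--     return (message, commit, trailing)
-- ===== Notes on version B (the rewrite author's own statement) =====
-- stated objective: alternative
-- what changed: Replaced A's two index-scans plus three slices with a single pass over the lines driven by a three-state machine (before/in/after list) that accumulates the three output lists directly.
import Mathlib
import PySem

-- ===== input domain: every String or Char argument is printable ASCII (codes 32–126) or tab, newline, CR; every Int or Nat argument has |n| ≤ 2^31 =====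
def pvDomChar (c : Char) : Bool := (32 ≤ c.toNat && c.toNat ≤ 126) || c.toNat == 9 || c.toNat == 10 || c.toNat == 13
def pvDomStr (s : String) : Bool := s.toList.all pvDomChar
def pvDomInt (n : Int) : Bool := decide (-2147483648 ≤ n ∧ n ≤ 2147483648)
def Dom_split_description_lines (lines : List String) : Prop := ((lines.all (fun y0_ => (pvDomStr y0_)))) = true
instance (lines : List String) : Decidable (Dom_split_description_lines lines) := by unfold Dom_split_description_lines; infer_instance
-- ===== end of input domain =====

-- ===== PORT A =====
-- A scans for the first line starting with "1. ", then scans forward for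
-- consecutive "<n>. " lines, and returns three slices of the input.

-- for i, line in enumerate(lines): if line.startswith('1. '): start = i; break
def pvAFind : List String → Nat → Option Nat
  | [], _ => none
  | l :: ls, i => if PySem.Str.startswith l "1. " then some i else pvAFind ls (i + 1)

-- for j in range(end, len(lines)): if lines[j].startswith(f'{expected_nr}. '): … else: break
def pvAEnd (lines : List String) (j : Nat) (expected : Int) (e : Nat) : Nat :=
  if h : j < lines.length then
    if PySem.Str.startswith lines[j] (PySem.Int.toStr expected ++ ". ") then
      pvAEnd lines (j + 1) (expected + 1) (j + 1)
    else e
  else e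
termination_by lines.length - j

def split_description_lines (lines : List String) : List String × List String × List String :=
  match pvAFind lines 0 with
  | none => (lines, [], [])
  | some start =>
    let e := pvAEnd lines (start + 1) 2 (start + 1)
    (PySem.List.slice lines none (some (start : Int)),
     PySem.List.slice lines (some (start : Int)) (some (e : Int)),
     PySem.List.slice lines (some (e : Int)) none)

-- ===== PORT B =====
-- B is a single pass: a three-state machine (0 = before list, 1 = in list,
-- 2 = after list) folded over the lines, accumulating the three output lists.

def pvBStep (st : Nat × Int × List String × List String × List String) (line : String) :
    Nat × Int × List String × List String × List String :=
  let (state, expected, msg, com, tr) := st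
  if state = 0 then
    if PySem.Str.startswith line "1. " then (1, expected, msg, com ++ [line], tr)
    else (0, expected, msg ++ [line], com, tr)
  else if state = 1 then
    if PySem.Str.startswith line (PySem.Int.toStr expected ++ ". ") then
      (1, expected + 1, msg, com ++ [line], tr)
    else (2, expected, msg, com, tr ++ [line])
  else (state, expected, msg, com, tr ++ [line])

def split_description_lines_alt (lines : List String) : List String × List String × List String :=
  (lines.foldl pvBStep (0, 2, [], [], [])).2.2

-- ===== PRECONDITION & SPEC =====
def Spec_split_description_lines (lines : List String) (out : List String × List String × List String) : Prop := out = split_description_lines_alt lines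
instance (lines : List String) (out : List String × List String × List String) : Decidable (Spec_split_description_lines lines out) := by unfold Spec_split_description_lines; infer_instance

-- ===== CLAIM (what is proved, stated in full; the proofs are below) =====
def Claim_equal_split_description_lines : Prop := ∀ (lines : List String), Dom_split_description_lines lines → Spec_split_description_lines lines (split_description_lines lines)

-- ===== LEMMAS AND PROOFS =====

-- the run of consecutive "<e>. ", "<e+1>. ", … lines at the front of ls
def scanTake : List String → Int → List String
  | [], _ => []
  | l :: ls, e =>
    if PySem.Str.startswith l (PySem.Int.toStr e ++ ". ") then l :: scanTake ls (e + 1) else []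

theorem scanTake_prefix : ∀ (ls : List String) (e : Int),
    ls.take (scanTake ls e).length = scanTake ls e := by
  intro ls
  induction ls with
  | nil => intro e; simp only [scanTake, List.length_nil, List.take_nil]
  | cons l ls ih =>
    intro e
    simp only [scanTake]
    by_cases h : PySem.Str.startswith l (PySem.Int.toStr e ++ ". ")
    · rw [if_pos h, List.length_cons, List.take_succ_cons, ih]
    · rw [if_neg h]; simp

theorem pvAEnd_eq : ∀ (lines : List String) (j : Nat) (e : Int),
    pvAEnd lines j e j = j + (scanTake (lines.drop j) e).length := by
  intro lines j
  induction hn : lines.length - j using Nat.strong_induction_on generalizing j with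
  | _ n ih =>
    intro e
    rw [pvAEnd]
    by_cases h : j < lines.length
    · rw [List.drop_eq_getElem_cons h]
      simp only [scanTake]
      by_cases hs : PySem.Str.startswith lines[j] (PySem.Int.toStr e ++ ". ")
      · have hlt : lines.length - (j + 1) < n := by omega
        rw [dif_pos h, if_pos hs, ih _ hlt (j + 1) rfl (e + 1)]
        rw [if_pos hs, List.length_cons]
        omega
      · rw [dif_pos h, if_neg hs]
        rw [if_neg hs, List.length_nil]
        omega
    · rw [dif_neg h]
      have hd : lines.drop j = [] := List.drop_eq_nil_of_le (by omega)
      rw [hd]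
      simp [scanTake]

theorem pvAFind_shift : ∀ (ls : List String) (i : Nat),
    pvAFind ls i = (pvAFind ls 0).map (· + i) := by
  intro ls
  induction ls with
  | nil => intro i; simp [pvAFind]
  | cons l ls ih =>
    intro i
    simp only [pvAFind]
    by_cases h : PySem.Str.startswith l "1. "
    · rw [if_pos h, if_pos h]; simp
    · rw [if_neg h, if_neg h, ih (i + 1), ih 1]
      cases pvAFind ls 0 <;> simp <;> omega

-- reference recursion both ports are reduced to
def specFn : List String → List String → List String × List String × List String
  | [], m => (m, [], [])
  | l :: ls, m =>
    if PySem.Str.startswith l "1. " then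
      (m, l :: scanTake ls 2, ls.drop (scanTake ls 2).length)
    else specFn ls (m ++ [l])

theorem specFn_acc : ∀ (ls : List String) (m : List String),
    specFn ls m = (m ++ (specFn ls []).1, (specFn ls []).2.1, (specFn ls []).2.2) := by
  intro ls
  induction ls with
  | nil => intro m; simp [specFn]
  | cons l ls ih =>
    intro m
    simp only [specFn]
    by_cases h : PySem.Str.startswith l "1. "
    · rw [if_pos h, if_pos h]; simp
    · rw [if_neg h, if_neg h, ih (m ++ [l]), ih ([] ++ [l])]
      simp

theorem foldl_state2 : ∀ (ls : List String) (e : Int) (m c t : List String),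
    List.foldl pvBStep (2, e, m, c, t) ls = (2, e, m, c, t ++ ls) := by
  intro ls
  induction ls with
  | nil => intro e m c t; simp
  | cons l ls ih =>
    intro e m c t
    simp only [List.foldl_cons]
    rw [show pvBStep (2, e, m, c, t) l = (2, e, m, c, t ++ [l]) from rfl, ih]
    simp

theorem foldl_state1 : ∀ (ls : List String) (e : Int) (m c t : List String),
    (List.foldl pvBStep (1, e, m, c, t) ls).2.2 =
      (m, c ++ scanTake ls e, t ++ ls.drop (scanTake ls e).length) := by
  intro ls
  induction ls with
  | nil => intro e m c t; simp [scanTake]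
  | cons l ls ih =>
    intro e m c t
    simp only [List.foldl_cons]
    rw [show pvBStep (1, e, m, c, t) l =
          (if PySem.Str.startswith l (PySem.Int.toStr e ++ ". ") = true then
            ((1 : Nat), e + 1, m, c ++ [l], t)
          else ((2 : Nat), e, m, c, t ++ [l])) from rfl]
    simp only [scanTake]
    by_cases h : PySem.Str.startswith l (PySem.Int.toStr e ++ ". ")
    · rw [if_pos h, if_pos h, ih (e + 1) m (c ++ [l]) t, List.length_cons,
          List.drop_succ_cons]
      simp
    · rw [if_neg h, if_neg h, foldl_state2, List.length_nil, List.drop_zero]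
      simp

theorem foldl_state0 : ∀ (ls : List String) (m : List String),
    (List.foldl pvBStep (0, 2, m, [], []) ls).2.2 = specFn ls m := by
  intro ls
  induction ls with
  | nil => intro m; simp [specFn]
  | cons l ls ih =>
    intro m
    simp only [List.foldl_cons]
    rw [show pvBStep (0, 2, m, [], []) l =
          (if PySem.Str.startswith l "1. " = true then
            ((1 : Nat), (2 : Int), m, [l], ([] : List String))
          else ((0 : Nat), (2 : Int), m ++ [l], [], [])) from rfl]
    simp only [specFn]
    by_cases h : PySem.Str.startswith l "1. "
    · rw [if_pos h, if_pos h, foldl_state1]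
      simp
    · rw [if_neg h, if_neg h, ih (m ++ [l])]

theorem portA_eq_specFn : ∀ (lines : List String),
    split_description_lines lines = specFn lines [] := by
  intro lines
  induction lines with
  | nil => simp [split_description_lines, pvAFind, specFn]
  | cons l ls ih =>
    by_cases h : PySem.Str.startswith l "1. "
    · have hf : pvAFind (l :: ls) 0 = some 0 := by
        simp only [pvAFind]; rw [if_pos h]
      rw [split_description_lines, hf]
      have he : pvAEnd (l :: ls) 1 2 1 = 1 + (scanTake ls 2).length := by
        simpa using pvAEnd_eq (l :: ls) 1 2
      simp only [he]
      rw [specFn, if_pos h]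
      rw [PySem.List.slice_to_natCast, PySem.List.slice_natCast, PySem.List.slice_from_natCast]
      rw [Nat.add_comm 1 (scanTake ls 2).length]
      simp only [List.take_zero, List.drop_zero, Nat.sub_zero, List.take_succ_cons,
        List.drop_succ_cons, scanTake_prefix]
    · have hf : pvAFind (l :: ls) 0 = (pvAFind ls 0).map (· + 1) := by
        simp only [pvAFind]; rw [if_neg h, pvAFind_shift]
      rw [specFn, if_neg h, specFn_acc, ← ih]
      cases hfind : pvAFind ls 0 with
      | none =>
        rw [split_description_lines, hf, hfind]
        rw [split_description_lines, hfind]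
        simp
      | some s =>
        rw [split_description_lines, hf, hfind]
        simp only [Option.map_some]
        have he : pvAEnd (l :: ls) (s + 1 + 1) 2 (s + 1 + 1) =
            (s + 2) + (scanTake (ls.drop (s + 1)) 2).length := by
          simpa [List.drop_succ_cons] using pvAEnd_eq (l :: ls) (s + 2) 2
        have he' : pvAEnd ls (s + 1) 2 (s + 1) =
            (s + 1) + (scanTake (ls.drop (s + 1)) 2).length := pvAEnd_eq ls (s + 1) 2
        rw [split_description_lines, hfind]
        simp only [he, he']
        rw [PySem.List.slice_to_natCast, PySem.List.slice_natCast, PySem.List.slice_from_natCast,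
            PySem.List.slice_to_natCast, PySem.List.slice_natCast, PySem.List.slice_from_natCast]
        simp only [List.take_succ_cons, List.drop_succ_cons, Prod.mk.injEq]
        refine ⟨by simp, by congr 1; omega, ?_⟩
        rw [show s + 2 + (scanTake (ls.drop (s + 1)) 2).length
              = (s + 1 + (scanTake (ls.drop (s + 1)) 2).length) + 1 from by omega,
            List.drop_succ_cons]

-- ===== VERDICT (by name: the statement is the Claim_ definition above) =====
theorem split_description_lines_spec : Claim_equal_split_description_lines := by
  intro lines _
  unfold Spec_split_description_lines split_description_lines_alt
  rw [foldl_state0, portA_eq_specFn]
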